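-- pv_equiv track=rewrite | github.com/Simenb123/Utvalg | a07_feature/control/statement_model.py | normalize_control_statement_view
-- ===== SOURCE A (Python) =====
-- CONTROL_STATEMENT_VIEW_ALL = "all"
--
-- CONTROL_STATEMENT_VIEW_PAYROLL = "payroll"
--
-- CONTROL_STATEMENT_VIEW_LEGACY = "legacy"
--
-- CONTROL_STATEMENT_VIEW_UNCLASSIFIED = "unclassified"
--
-- CONTROL_STATEMENT_VIEW_LABELS = {
--     CONTROL_STATEMENT_VIEW_PAYROLL: "Payroll",
--     CONTROL_STATEMENT_VIEW_ALL: "Alle",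
--     CONTROL_STATEMENT_VIEW_LEGACY: "Legacy analyse",
--     CONTROL_STATEMENT_VIEW_UNCLASSIFIED: "Uklassifisert",
-- }
--
-- def _stringify(value: object) -> str:
--     return str(value or "").strip()
--
-- def normalize_control_statement_view(view: object) -> str:
--     view_s = _stringify(view).casefold()
--     if view_s in {
--         CONTROL_STATEMENT_VIEW_ALL,
--         CONTROL_STATEMENT_VIEW_PAYROLL,
--         CONTROL_STATEMENT_VIEW_LEGACY,
--         CONTROL_STATEMENT_VIEW_UNCLASSIFIED,
--     }:
--         return view_s
--     for key, label in CONTROL_STATEMENT_VIEW_LABELS.items():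
--         if view_s == _stringify(label).casefold():
--             return key
--     return CONTROL_STATEMENT_VIEW_PAYROLL
-- ===== SOURCE B (Python) =====
-- CONTROL_STATEMENT_VIEW_ALL = "all"
-- CONTROL_STATEMENT_VIEW_PAYROLL = "payroll"
-- CONTROL_STATEMENT_VIEW_LEGACY = "legacy"
-- CONTROL_STATEMENT_VIEW_UNCLASSIFIED = "unclassified"
--
-- CONTROL_STATEMENT_VIEW_LABELS = {
--     CONTROL_STATEMENT_VIEW_PAYROLL: "Payroll",
--     CONTROL_STATEMENT_VIEW_ALL: "Alle",
--     CONTROL_STATEMENT_VIEW_LEGACY: "Legacy analyse",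
--     CONTROL_STATEMENT_VIEW_UNCLASSIFIED: "Uklassifisert",
-- }
--
-- # Precomputed reverse-lookup table: each canonical key maps to itself, each
-- # casefolded label maps to its canonical key. Built once at module load.
-- _ALIAS_TO_VIEW = {key: key for key in CONTROL_STATEMENT_VIEW_LABELS}
-- for _key, _label in CONTROL_STATEMENT_VIEW_LABELS.items():
--     _ALIAS_TO_VIEW[str(_label or "").strip().casefold()] = _key
--
--
-- def normalize_control_statement_view(view: object) -> str:
--     view_s = str(view or "").strip().casefold()
--     return _ALIAS_TO_VIEW.get(view_s, CONTROL_STATEMENT_VIEW_PAYROLL)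
-- ===== Notes on version B (the rewrite author's own statement) =====
-- stated objective: simpler
-- what changed: Replaces the set-membership branch plus the per-call label loop with one reverse-lookup dict (canonical keys and casefolded labels -> canonical key) built once at module load, so the function body is a single dict lookup with a payroll default.
import Mathlib
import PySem

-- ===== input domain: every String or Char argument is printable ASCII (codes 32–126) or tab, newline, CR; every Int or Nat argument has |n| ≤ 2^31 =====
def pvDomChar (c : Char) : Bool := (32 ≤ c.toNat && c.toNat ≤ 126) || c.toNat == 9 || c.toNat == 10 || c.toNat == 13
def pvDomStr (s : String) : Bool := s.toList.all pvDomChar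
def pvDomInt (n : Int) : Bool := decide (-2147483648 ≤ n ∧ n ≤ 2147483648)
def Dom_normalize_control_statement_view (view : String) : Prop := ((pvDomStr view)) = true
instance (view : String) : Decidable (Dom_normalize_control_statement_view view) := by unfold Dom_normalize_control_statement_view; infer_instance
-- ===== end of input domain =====

-- B replaces A's set-membership branch plus per-call label loop with one precomputed
-- reverse-lookup dict (canonical keys and casefolded labels -> canonical key) and a
-- single lookup with payroll default; same return value on the ASCII domain (where casefold = lower).


-- ===== PORT A =====
-- _stringify: str(value or "").strip(); the argument is a String, so `value or ""` is the string itself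
def pvStringify (value : String) : String := PySem.Str.strip value

-- CONTROL_STATEMENT_VIEW_LABELS, in insertion order
def pvLabels : List (String × String) :=
  [("payroll", "Payroll"), ("all", "Alle"),
   ("legacy", "Legacy analyse"), ("unclassified", "Uklassifisert")]

-- casefold = lower on the printable-ASCII domain
def normalize_control_statement_view (view : String) : String :=
  let view_s := PySem.Str.lower (pvStringify view)
  if view_s = "all" ∨ view_s = "payroll" ∨ view_s = "legacy" ∨ view_s = "unclassified" then
    view_s
  else
    -- the `for key, label in …: if …: return key` loop
    match pvLabels.find? (fun kl => view_s == PySem.Str.lower (pvStringify kl.2)) with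
    | some kl => kl.1
    | none => "payroll"

-- ===== PORT B =====
-- _ALIAS_TO_VIEW: {key: key for key in labels}, then each casefolded label -> its key
def pvAliasToView : PySem.Dict String String :=
  let d := pvLabels.foldl (fun d kl => d.insert kl.1 kl.1) PySem.Dict.empty
  pvLabels.foldl (fun d kl => d.insert (PySem.Str.lower (PySem.Str.strip kl.2)) kl.1) d

def normalize_control_statement_view_alt (view : String) : String :=
  PySem.Dict.getD pvAliasToView (PySem.Str.lower (PySem.Str.strip view)) "payroll"

-- ===== PRECONDITION & SPEC =====
def Spec_normalize_control_statement_view (view : String) (out : String) : Prop := out = normalize_control_statement_view_alt view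
instance (view : String) (out : String) : Decidable (Spec_normalize_control_statement_view view out) := by unfold Spec_normalize_control_statement_view; infer_instance

-- ===== CLAIM (what is proved, stated in full; the proofs are below) =====
def Claim_equal_normalize_control_statement_view : Prop := ∀ (view : String), Dom_normalize_control_statement_view view → Spec_normalize_control_statement_view view (normalize_control_statement_view view)

-- ===== LEMMAS AND PROOFS =====

-- The ports agree: both are the same function of s := lower (strip view); generalize s,
-- split on the seven alias strings, and decide each literal case.
theorem pv_ports_eq (view : String) :
    normalize_control_statement_view view = normalize_control_statement_view_alt view := by
  unfold normalize_control_statement_view normalize_control_statement_view_alt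
  have hps : pvStringify = PySem.Str.strip := rfl
  rw [hps]
  generalize PySem.Str.lower (PySem.Str.strip view) = s
  by_cases h : s = "all" ∨ s = "payroll" ∨ s = "legacy" ∨ s = "unclassified" ∨
      s = "alle" ∨ s = "legacy analyse" ∨ s = "uklassifisert"
  · rcases h with h | h | h | h | h | h | h <;> subst h <;> decide
  · push Not at h
    obtain ⟨h1, h2, h3, h4, h5, h6, h7⟩ := h
    have f : ∀ t : String, s ≠ t → (s == t) = false ∧ (t == s) = false := fun t ht =>
      ⟨beq_eq_false_iff_ne.mpr ht, beq_eq_false_iff_ne.mpr (Ne.symm ht)⟩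
    have hitems : pvAliasToView.items =
        [("payroll","payroll"),("all","all"),("legacy","legacy"),("unclassified","unclassified"),
         ("alle","all"),("legacy analyse","legacy"),("uklassifisert","unclassified")] := by decide
    have e1 : PySem.Str.lower (PySem.Str.strip "Payroll") = "payroll" := by decide
    have e2 : PySem.Str.lower (PySem.Str.strip "Alle") = "alle" := by decide
    have e3 : PySem.Str.lower (PySem.Str.strip "Legacy analyse") = "legacy analyse" := by decide
    have e4 : PySem.Str.lower (PySem.Str.strip "Uklassifisert") = "uklassifisert" := by decide
    simp only [pvLabels, List.find?, e1, e2, e3, e4, PySem.Dict.getD, PySem.Dict.get?, hitems,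
      (f _ h1).2, (f _ h2).1, (f _ h2).2, (f _ h3).2, (f _ h4).2,
      (f _ h5).1, (f _ h5).2, (f _ h6).1, (f _ h6).2, (f _ h7).1, (f _ h7).2,
      h1, h2, h3, h4, if_false, or_self, Option.map_none, Option.getD_none]

-- ===== VERDICT (by name: the statement is the Claim_ definition above) =====
theorem normalize_control_statement_view_spec : Claim_equal_normalize_control_statement_view := by
  intro view _
  exact pv_ports_eq view
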